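-- pv_equiv track=rewrite | github.com/HenryScratch/rzd_bot | helpers.py | find_free_seats_coupes
-- ===== SOURCE A (Python) =====
-- def find_free_seats_coupes(free_seats: list):
--     total_seats=36
--     seats_per_coupe = 4
--     free_seats_set = set(free_seats)
--
--     # Списки для купе с 4, 3 и 2 свободными местами
--     fully_free_coupes = []
--     three_free_coupes = []
--     two_free_coupes = []
--     one_free_coupes = []
--
--     # Проверяем каждое купе
--     for coupe_num in range(total_seats // seats_per_coupe):
--         # Номера мест в текущем купе
--         start_seat = coupe_num * seats_per_coupe + 1
--         coupe_seats = {start_seat + i for i in range(seats_per_coupe)}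
--
--         # Находим пересечение свободных мест с местами в купе
--         free_in_coupe = coupe_seats.intersection(free_seats_set)
--         free_count = len(free_in_coupe)
--
--         # Определяем тип купе по количеству свободных мест
--         if free_count == 4:
--             fully_free_coupes.append(coupe_num + 1)
--         elif free_count == 3:
--             three_free_coupes.append(coupe_num + 1)
--         elif free_count == 2:
--             two_free_coupes.append(coupe_num + 1)
--         elif free_count == 1:
--             one_free_coupes.append(coupe_num + 1)
--
--     # Возвращаем списки купе по количеству свободных мест
--     return {'4': len(fully_free_coupes), '3': len(three_free_coupes), '2': len(two_free_coupes), '1': len(one_free_coupes)}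
-- ===== SOURCE B (Python) =====
-- def find_free_seats_coupes(free_seats: list):
--     # Bin each distinct in-range seat into its coupe, count seats per coupe
--     # with a counting dict, then tally coupes by their free-seat count.
--     bins = [(seat - 1) // 4 for seat in set(free_seats) if 1 <= seat <= 36]
--     per_coupe = {}
--     for c in bins:
--         per_coupe[c] = per_coupe.get(c, 0) + 1
--     occ = list(per_coupe.values())
--     return {'4': occ.count(4), '3': occ.count(3), '2': occ.count(2), '1': occ.count(1)}
-- ===== Notes on version B (the rewrite author's own statement) =====
-- stated objective: alternative
-- what changed: Instead of scanning each of the 9 coupes and intersecting its 4-seat set with the free-seat set, B bins the distinct in-range seats into coupe numbers via (seat-1)//4, counts seats per coupe with one counting dict, and reads the answer off as occurrence counts of 4/3/2/1 among the per-coupe totals.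
import Mathlib
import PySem

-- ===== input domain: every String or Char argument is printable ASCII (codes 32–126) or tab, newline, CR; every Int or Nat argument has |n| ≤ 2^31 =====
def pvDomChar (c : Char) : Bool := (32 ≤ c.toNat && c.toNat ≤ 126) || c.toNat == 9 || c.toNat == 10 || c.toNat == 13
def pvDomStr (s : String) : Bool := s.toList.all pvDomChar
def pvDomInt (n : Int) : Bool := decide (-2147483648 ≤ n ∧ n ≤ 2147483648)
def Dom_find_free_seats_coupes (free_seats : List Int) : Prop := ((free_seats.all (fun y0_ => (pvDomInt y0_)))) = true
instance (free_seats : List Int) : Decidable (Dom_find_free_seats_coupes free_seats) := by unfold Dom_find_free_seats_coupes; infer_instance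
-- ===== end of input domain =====

-- B replaces A's scan of the 9 coupes (intersecting each coupe's seat set with the free-seat set)
-- by binning the distinct in-range seats into coupes with (seat-1)//4, counting per coupe in one
-- dict, and tallying how many per-coupe totals equal 4/3/2/1 (objective: alternative).

-- ===== PORT A =====
def find_free_seats_coupes (free_seats : List Int) : List (String × Int) :=
  let total_seats : Int := 36
  let seats_per_coupe : Int := 4
  let free_seats_set : PySem.Set Int := PySem.Set.ofList free_seats
  let st := (PySem.List.pyRange 0 (PySem.Int.floordiv total_seats seats_per_coupe) 1).foldl
    (fun (st : List Int × List Int × List Int × List Int) coupe_num =>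
      let start_seat := coupe_num * seats_per_coupe + 1
      let coupe_seats : PySem.Set Int :=
        PySem.Set.ofList ((PySem.List.pyRange 0 seats_per_coupe 1).map (fun i => start_seat + i))
      let free_in_coupe := PySem.Set.inter coupe_seats free_seats_set
      let free_count := PySem.Set.len free_in_coupe
      if free_count = 4 then (st.1 ++ [coupe_num + 1], st.2.1, st.2.2.1, st.2.2.2)
      else if free_count = 3 then (st.1, st.2.1 ++ [coupe_num + 1], st.2.2.1, st.2.2.2)
      else if free_count = 2 then (st.1, st.2.1, st.2.2.1 ++ [coupe_num + 1], st.2.2.2)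
      else if free_count = 1 then (st.1, st.2.1, st.2.2.1, st.2.2.2 ++ [coupe_num + 1])
      else st)
    ([], [], [], [])
  [("4", PySem.List.len st.1), ("3", PySem.List.len st.2.1),
   ("2", PySem.List.len st.2.2.1), ("1", PySem.List.len st.2.2.2)]

-- ===== PORT B =====
-- (bins is built by iterating set(free_seats); the returned dict depends only on the MULTISET of
--  bins, so Python's set iteration order cannot affect the result and Set.ofList's order is exact)
def find_free_seats_coupes_alt (free_seats : List Int) : List (String × Int) :=
  let bins := ((PySem.Set.ofList free_seats).filter
      (fun seat => decide (1 ≤ seat) && decide (seat ≤ 36))).map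
    (fun seat => PySem.Int.floordiv (seat - 1) 4)
  let per_coupe := bins.foldl (fun (d : PySem.Dict Int Int) c => d.insert c (d.getD c 0 + 1))
    PySem.Dict.empty
  let occ := per_coupe.values
  [("4", (PySem.List.count occ 4 : Int)), ("3", (PySem.List.count occ 3 : Int)),
   ("2", (PySem.List.count occ 2 : Int)), ("1", (PySem.List.count occ 1 : Int))]

-- ===== PRECONDITION & SPEC =====
def Spec_find_free_seats_coupes (free_seats : List Int) (out : List (String × Int)) : Prop := out = find_free_seats_coupes_alt free_seats
instance (free_seats : List Int) (out : List (String × Int)) : Decidable (Spec_find_free_seats_coupes free_seats out) := by unfold Spec_find_free_seats_coupes; infer_instance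

-- ===== CLAIM (what is proved, stated in full; the proofs are below) =====
def Claim_equal_find_free_seats_coupes : Prop := ∀ (free_seats : List Int), Dom_find_free_seats_coupes free_seats → Spec_find_free_seats_coupes free_seats (find_free_seats_coupes free_seats)

-- ===== LEMMAS AND PROOFS =====

-- countP agrees on two duplicate-free lists once the predicate forces membership to coincide
lemma countP_eq_of_nodup {α : Type} (p : α → Bool) {l₁ l₂ : List α}
    (h₁ : l₁.Nodup) (h₂ : l₂.Nodup)
    (h : ∀ x, p x = true → (x ∈ l₁ ↔ x ∈ l₂)) : l₁.countP p = l₂.countP p := by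
  rw [List.countP_eq_length_filter, List.countP_eq_length_filter]
  apply List.Perm.length_eq
  rw [List.perm_ext_iff_of_nodup (h₁.filter p) (h₂.filter p)]
  intro x
  simp only [List.mem_filter]
  constructor
  · rintro ⟨hm, hp⟩; exact ⟨(h x hp).1 hm, hp⟩
  · rintro ⟨hm, hp⟩; exact ⟨(h x hp).2 hm, hp⟩

-- A's four-way classifying fold, characterised componentwise
lemma quad_foldl (g : Int → Int) (L : List Int) (a b c d : List Int) :
    L.foldl (fun (st : List Int × List Int × List Int × List Int) x =>
      if g x = 4 then (st.1 ++ [x + 1], st.2.1, st.2.2.1, st.2.2.2)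
      else if g x = 3 then (st.1, st.2.1 ++ [x + 1], st.2.2.1, st.2.2.2)
      else if g x = 2 then (st.1, st.2.1, st.2.2.1 ++ [x + 1], st.2.2.2)
      else if g x = 1 then (st.1, st.2.1, st.2.2.1, st.2.2.2 ++ [x + 1])
      else st) (a, b, c, d)
    = (a ++ (L.filter (fun x => g x == 4)).map (· + 1),
       b ++ (L.filter (fun x => g x == 3)).map (· + 1),
       c ++ (L.filter (fun x => g x == 2)).map (· + 1),
       d ++ (L.filter (fun x => g x == 1)).map (· + 1)) := by
  induction L generalizing a b c d with
  | nil => simp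
  | cons x xs ih =>
    simp only [List.foldl_cons, List.filter_cons]
    by_cases h4 : g x = 4
    · simp [h4, ih]
    · by_cases h3 : g x = 3
      · simp [h3, ih]
      · by_cases h2 : g x = 2
        · simp [h2, ih]
        · by_cases h1 : g x = 1
          · simp [h1, ih]
          · simp [h4, h3, h2, h1, ih]

-- A's per-coupe intersection size equals the number of occurrences of that coupe among B's bins
lemma coupe_len_eq_bins_count (S : List Int) (hS : S.Nodup) (c : Int) (h0 : 0 ≤ c) (h9 : c < 9) :
    PySem.Set.len (PySem.Set.inter
      (PySem.Set.ofList ((PySem.List.pyRange 0 4 1).map (fun i => c * 4 + 1 + i))) S)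
    = (((S.filter (fun s => decide (1 ≤ s) && decide (s ≤ 36))).map
        (fun s => PySem.Int.floordiv (s - 1) 4)).count c : Int) := by
  have hr : PySem.List.pyRange 0 4 1 = [0, 1, 2, 3] := by decide
  rw [hr]
  simp only [List.map_cons, List.map_nil]
  have hnd4 : ([c * 4 + 1 + 0, c * 4 + 1 + 1, c * 4 + 1 + 2, c * 4 + 1 + 3] : List Int).Nodup := by
    simp
  rw [PySem.Set.ofList_eq_self_of_nodup _ hnd4]
  simp only [PySem.Set.inter, PySem.Set.len]
  rw [Nat.cast_inj, ← List.countP_eq_length_filter, List.count_eq_countP, List.countP_map,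
    List.countP_filter]
  set L4 : List Int := [c * 4 + 1 + 0, c * 4 + 1 + 1, c * 4 + 1 + 2, c * 4 + 1 + 3] with hL4
  set P : Int → Bool := fun x => decide (x ∈ S) &&
    ((PySem.Int.floordiv (x - 1) 4 == c) && (decide (1 ≤ x) && decide (x ≤ 36))) with hP
  have hchar : ∀ x : Int, x ∈ L4 → (1 ≤ x ∧ x ≤ 36 ∧ PySem.Int.floordiv (x - 1) 4 = c) := by
    intro x hx
    have hx' : x = c * 4 + 1 + 0 ∨ x = c * 4 + 1 + 1 ∨ x = c * 4 + 1 + 2 ∨ x = c * 4 + 1 + 3 := by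
      simpa [hL4] using hx
    refine ⟨by omega, by omega, ?_⟩
    rw [PySem.Int.floordiv_eq_iff_of_pos (by norm_num)]
    omega
  have e1 : L4.countP (fun x => PySem.Set.contains S x) = L4.countP P := by
    apply List.countP_congr
    intro x hx
    obtain ⟨hb1, hb2, hfd⟩ := hchar x hx
    simp only [hP, PySem.Set.contains_eq_listContains, List.contains_eq_mem, hfd, BEq.rfl,
      hb1, hb2, decide_true, Bool.and_true]
  have e2 : L4.countP P = S.countP P := by
    apply countP_eq_of_nodup P hnd4 hS
    intro x hx
    simp only [hP, Bool.and_eq_true, decide_eq_true_eq, beq_iff_eq] at hx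
    obtain ⟨hmS, hfd, hb1, hb2⟩ := hx
    rw [PySem.Int.floordiv_eq_iff_of_pos (by norm_num)] at hfd
    constructor
    · intro _; exact hmS
    · intro _; simp only [hL4, List.mem_cons, List.not_mem_nil, or_false]; omega
  have e3 : S.countP P = S.countP (fun a =>
      (PySem.Int.floordiv (a - 1) 4 == c) && (decide (1 ≤ a) && decide (a ≤ 36))) := by
    apply List.countP_congr
    intro s hs
    simp only [hP, hs, decide_true, Bool.true_and]
  rw [e1, e2, e3]; rfl

-- the per-count tally over B's deduped bins equals the tally over the nine coupe numbers
lemma main_count (free_seats : List Int) (j : Int) (hj : 0 < j) :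
    ((PySem.List.pyRange 0 9 1).countP (fun x =>
      PySem.Set.len (PySem.Set.inter
        (PySem.Set.ofList ((PySem.List.pyRange 0 4 1).map (fun i => x * 4 + 1 + i)))
        (PySem.Set.ofList free_seats)) == j))
    = (((PySem.Set.ofList (((PySem.Set.ofList free_seats).filter
          (fun seat => decide (1 ≤ seat) && decide (seat ≤ 36))).map
          (fun seat => PySem.Int.floordiv (seat - 1) 4))).map
        (fun k => ((((PySem.Set.ofList free_seats).filter
          (fun seat => decide (1 ≤ seat) && decide (seat ≤ 36))).map
          (fun seat => PySem.Int.floordiv (seat - 1) 4)).count k : Int))).count j) := by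
  set S : List Int := PySem.Set.ofList free_seats with hSdef
  have hS : S.Nodup := PySem.Set.nodup_ofList free_seats
  set bins : List Int := (S.filter (fun seat => decide (1 ≤ seat) && decide (seat ≤ 36))).map
    (fun seat => PySem.Int.floordiv (seat - 1) 4) with hbins
  rw [List.count_eq_countP, List.countP_map]
  have hmem_bins : ∀ k : Int, k ∈ bins → 0 ≤ k ∧ k < 9 := by
    intro k hk
    rw [hbins] at hk
    simp only [List.mem_map, List.mem_filter, Bool.and_eq_true, decide_eq_true_eq] at hk
    obtain ⟨s, ⟨_, hb1, hb2⟩, hq⟩ := hk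
    have h4 : (0 : Int) < 4 := by norm_num
    have := (PySem.Int.floordiv_eq_iff_of_pos h4 (a := s - 1) (q := k)).1 hq.symm.symm
    rw [← hq]
    constructor
    · rw [PySem.Int.le_floordiv_iff_mul_le h4]; omega
    · rw [PySem.Int.floordiv_lt_iff_lt_mul h4]; omega
  have step1 : (PySem.Set.ofList bins).countP (fun k => ((bins.count k : Int) == j))
      = (PySem.List.pyRange 0 9 1).countP (fun k => ((bins.count k : Int) == j)) := by
    apply countP_eq_of_nodup _ (PySem.Set.nodup_ofList bins) (PySem.List.nodup_pyRange_one 0 9)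
    intro k hk
    have hcnt : (bins.count k : Int) = j := by simpa using hk
    have hmem : k ∈ bins := by
      rw [← List.count_pos_iff]
      omega
    have hb := hmem_bins k hmem
    constructor
    · intro _; rw [PySem.List.mem_pyRange_one]; exact hb
    · intro _; rw [PySem.Set.mem_ofList]; exact hmem
  have step2 : (PySem.List.pyRange 0 9 1).countP (fun k => ((bins.count k : Int) == j))
      = (PySem.List.pyRange 0 9 1).countP (fun x =>
          PySem.Set.len (PySem.Set.inter
            (PySem.Set.ofList ((PySem.List.pyRange 0 4 1).map (fun i => x * 4 + 1 + i))) S) == j) := by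
    apply List.countP_congr
    intro x hx
    rw [PySem.List.mem_pyRange_one] at hx
    rw [coupe_len_eq_bins_count S hS x hx.1 hx.2]
  rw [← step2, ← step1]
  rfl

-- ===== VERDICT (by name: the statement is the Claim_ definition above) =====
theorem find_free_seats_coupes_spec : Claim_equal_find_free_seats_coupes := by
  intro free_seats _
  unfold Spec_find_free_seats_coupes find_free_seats_coupes find_free_seats_coupes_alt
  simp only [PySem.Dict.foldl_insert_getD_add_one_eq_counter, PySem.Dict.values,
    PySem.Dict.items_counter, List.map_map]
  have h9 : PySem.Int.floordiv 36 4 = 9 := by decide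
  rw [h9, quad_foldl]
  simp only [List.nil_append, PySem.List.len_eq, List.length_map, List.cons.injEq,
    Prod.mk.injEq, and_true, true_and]
  refine ⟨?_, ?_, ?_, ?_⟩
  all_goals {
    rw [← List.countP_eq_length_filter, Nat.cast_inj]
    first
    | (rw [main_count free_seats 4 (by norm_num)]; rfl)
    | (rw [main_count free_seats 3 (by norm_num)]; rfl)
    | (rw [main_count free_seats 2 (by norm_num)]; rfl)
    | (rw [main_count free_seats 1 (by norm_num)]; rfl)
  }
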